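-- pv_equiv track=rewrite | github.com/JeongHunHui/coding-test-practice | 프로그래머스/2/42626. 더 맵게/더 맵게.py | solution
-- ===== SOURCE A (Python) =====
-- from heapq import heapify, heappush, heappop
--
-- def solution(scoville, K):
--     heapify(scoville)
--     answer = 0
--     while len(scoville) > 1:
--         first_value = heappop(scoville)
--         if first_value >= K:
--             return answer
--         second_value = heappop(scoville)
--         heappush(scoville, first_value + second_value * 2)
--         answer += 1
--     return answer if heappop(scoville) >= K else -1
-- ===== SOURCE B (Python) =====
-- def solution(scoville, K):
--     # Sorted-list strategy instead of a heap: sort once, the two smallest are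
--     # always at the front, and each merged value is re-inserted at its sorted
--     # position by a linear scan. Works on a sorted copy (does not mutate the
--     # caller's list, unlike A's in-place heapify); return value is the same.
--     pool = sorted(scoville)
--     answer = 0
--     while len(pool) > 1:
--         first_value = pool[0]
--         if first_value >= K:
--             return answer
--         merged = first_value + pool[1] * 2
--         rest = pool[2:]
--         i = 0
--         while i < len(rest) and rest[i] < merged:
--             i += 1
--         rest.insert(i, merged)
--         pool = rest
--         answer += 1
--     return answer if pool[0] >= K else -1
-- ===== Notes on version B (the rewrite author's own statement) =====
-- stated objective: alternative
-- what changed: Replaces the binary heap by a single initial sort plus ordered re-insertion of each merged value into the sorted pool, so the two smallest elements are always the first two list entries (B works on a sorted copy instead of heapifying the argument in place; return value is identical).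
import Mathlib
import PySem

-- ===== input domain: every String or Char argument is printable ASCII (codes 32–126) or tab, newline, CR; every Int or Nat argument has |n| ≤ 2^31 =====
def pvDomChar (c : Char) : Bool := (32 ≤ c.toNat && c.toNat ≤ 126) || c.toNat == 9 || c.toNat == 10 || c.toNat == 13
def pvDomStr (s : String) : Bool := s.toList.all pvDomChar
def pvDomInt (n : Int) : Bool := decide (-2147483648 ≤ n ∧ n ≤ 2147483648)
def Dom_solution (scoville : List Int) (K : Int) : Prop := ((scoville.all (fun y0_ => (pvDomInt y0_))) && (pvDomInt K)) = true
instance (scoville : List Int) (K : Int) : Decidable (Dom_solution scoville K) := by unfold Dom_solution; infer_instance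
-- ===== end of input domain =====

-- B replaces A's binary heap by a single initial sort plus ordered re-insertion of each
-- merged value (alternative data structure, same return value); A mutates `scoville` in
-- place (heapify/pop/push) while B works on a sorted copy — the equivalence proved here
-- is about the RETURN value only.

-- ===== PORT A =====
-- heapq works on int values only here, so the heap is modeled by its contents:
-- heappop returns the minimum and removes one (the first) occurrence of it,
-- heappush appends; this is exactly heapq's observable value behaviour.
def pvHeapPop (l : List Int) : Option (Int × List Int) :=
  match PySem.List.min? l (fun x => x) with
  | none => none                      -- heappop on an empty heap: IndexError
  | some m => some (m, l.erase m)

theorem pvHeapPop_some_length (l l' : List Int) (f : Int)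
    (h : pvHeapPop l = some (f, l')) : l'.length + 1 = l.length := by
  unfold pvHeapPop at h
  cases hm : PySem.List.min? l (fun x => x) with
  | none => rw [hm] at h; cases h
  | some m =>
    rw [hm] at h
    have hmem : m ∈ l := PySem.List.min?_mem hm
    cases h
    have h1 := List.length_erase_of_mem hmem
    have h2 : 0 < l.length := List.length_pos_of_mem hmem
    omega

def pvLoopA (heap : List Int) (K answer : Int) : Int :=
  if h : 1 < heap.length then
    match hp : pvHeapPop heap with
    | none => 0                      -- unreachable: heap is nonempty here
    | some (first_value, heap1) =>
      if first_value ≥ K then answer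
      else
        match hp2 : pvHeapPop heap1 with
        | none => 0                  -- unreachable: heap1 is nonempty here
        | some (second_value, heap2) =>
          pvLoopA (heap2 ++ [first_value + second_value * 2]) K (answer + 1)
  else
    match pvHeapPop heap with
    | none => 0                      -- empty input: Python raises IndexError (outside Pre_)
    | some (x, _) => if x ≥ K then answer else -1
termination_by heap.length
decreasing_by
  have h1 := pvHeapPop_some_length _ _ _ hp
  have h2 := pvHeapPop_some_length _ _ _ hp2
  simp only [List.length_append, List.length_cons, List.length_nil]
  omega

def solution (scoville : List Int) (K : Int) : Int :=
  -- heapify only rearranges the list; in the contents model it is the identity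
  pvLoopA scoville K 0

-- ===== PORT B =====
-- the inner `while i < len(rest) and rest[i] < merged` scan + insert of Source B
def pvInsertSorted (m : Int) : List Int → List Int
  | [] => [m]
  | x :: xs => if x < m then x :: pvInsertSorted m xs else m :: x :: xs

theorem pvInsertSorted_length (m : Int) (l : List Int) :
    (pvInsertSorted m l).length = l.length + 1 := by
  induction l with
  | nil => rfl
  | cons x xs ih =>
    unfold pvInsertSorted
    by_cases h : x < m <;> simp [h, ih]

def pvLoopB (pool : List Int) (K answer : Int) : Int :=
  match pool with
  | f :: s :: rest =>
    if f ≥ K then answer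
    else pvLoopB (pvInsertSorted (f + s * 2) rest) K (answer + 1)
  | [f] => if f ≥ K then answer else -1
  | [] => 0                          -- empty input: Python raises IndexError (outside Pre_)
termination_by pool.length
decreasing_by
  simp [pvInsertSorted_length]

def solution_alt (scoville : List Int) (K : Int) : Int :=
  pvLoopB (PySem.List.sorted scoville (fun x => x) false) K 0

-- ===== PRECONDITION & SPEC =====
-- Pre_ excludes only the empty list, on which Python A raises IndexError (heappop of []).
def Pre_solution (scoville : List Int) (K : Int) : Prop := scoville ≠ []
instance (scoville : List Int) (K : Int) : Decidable (Pre_solution scoville K) := by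
  unfold Pre_solution; infer_instance
def pvWitness_solution : List Int × Int := ([1, 2, 3, 9, 10, 12], 7)

def Spec_solution (scoville : List Int) (K : Int) (out : Int) : Prop := out = solution_alt scoville K
instance (scoville : List Int) (K : Int) (out : Int) : Decidable (Spec_solution scoville K out) := by unfold Spec_solution; infer_instance

-- ===== CLAIM (what is proved, stated in full; the proofs are below) =====
def Claim_equal_solution : Prop := ∀ (scoville : List Int) (K : Int), Dom_solution scoville K → Pre_solution scoville K → Spec_solution scoville K (solution scoville K)

-- ===== LEMMAS AND PROOFS =====

theorem pvInsertSorted_perm (m : Int) (l : List Int) :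
    (pvInsertSorted m l).Perm (m :: l) := by
  induction l with
  | nil => rfl
  | cons x xs ih =>
    unfold pvInsertSorted
    by_cases h : x < m
    · simp only [if_pos h]
      exact (ih.cons x).trans (List.Perm.swap m x xs)
    · simp [h]

theorem pvInsertSorted_mem (m y : Int) (l : List Int) :
    y ∈ pvInsertSorted m l ↔ y = m ∨ y ∈ l := by
  rw [(pvInsertSorted_perm m l).mem_iff]; simp

theorem pvInsertSorted_pairwise (m : Int) (l : List Int)
    (h : l.Pairwise (· ≤ ·)) : (pvInsertSorted m l).Pairwise (· ≤ ·) := by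
  induction l with
  | nil => simp [pvInsertSorted]
  | cons x xs ih =>
    rcases List.pairwise_cons.mp h with ⟨hx, hxs⟩
    unfold pvInsertSorted
    by_cases hlt : x < m
    · simp only [if_pos hlt]
      refine List.pairwise_cons.mpr ⟨?_, ih hxs⟩
      intro y hy
      rcases (pvInsertSorted_mem m y xs).mp hy with rfl | hy
      · exact le_of_lt hlt
      · exact hx y hy
    · simp only [if_neg hlt]
      have hmx : m ≤ x := le_of_not_gt hlt
      refine List.pairwise_cons.mpr ⟨?_, h⟩
      intro y hy
      rcases List.mem_cons.mp hy with rfl | hy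
      · exact hmx
      · exact hmx.trans (hx y hy)

-- the first element of a sorted list is what heappop returns from any permutation of it
theorem pvHeapPop_of_perm_sorted (heap : List Int) (f : Int) (t : List Int)
    (hperm : heap.Perm (f :: t)) (hmin : ∀ y ∈ f :: t, f ≤ y) :
    pvHeapPop heap = some (f, heap.erase f) := by
  have hne : heap ≠ [] := by
    intro h; subst h; exact absurd hperm.symm (by simp)
  cases hm : PySem.List.min? heap (fun x => x) with
  | none => exact absurd ((PySem.List.min?_eq_none_iff heap (fun x => x)).mp hm) hne
  | some m =>
    have hmem : m ∈ heap := PySem.List.min?_mem hm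
    have hfheap : f ∈ heap := hperm.mem_iff.mpr (by simp)
    have hmf : m ≤ f := PySem.List.min?_isMin hm f hfheap
    have hfm : f ≤ m := hmin m (hperm.mem_iff.mp hmem)
    have : m = f := le_antisymm hmf hfm
    subst this
    unfold pvHeapPop
    rw [hm]

theorem pvLoop_eq : ∀ (n : ℕ) (pool heap : List Int) (K ans : Int),
    pool.length = n → heap.Perm pool → pool.Pairwise (· ≤ ·) →
    pvLoopA heap K ans = pvLoopB pool K ans := by
  intro n
  induction n using Nat.strong_induction_on with
  | _ n ih =>
    intro pool heap K ans hlen hperm hsort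
    match pool with
    | [] =>
      have : heap = [] := hperm.eq_nil
      subst this
      rw [pvLoopA, pvLoopB]
      simp [pvHeapPop, PySem.List.min?]
    | [f] =>
      have : heap = [f] := List.perm_singleton.mp hperm
      subst this
      rw [pvLoopA, pvLoopB]
      have hpop : pvHeapPop [f] = some (f, ([] : List Int)) := by
        simp [pvHeapPop, PySem.List.min?_id_cons]
      simp [hpop]
    | f :: s :: rest =>
      have hlen2 : 1 < heap.length := by
        rw [hperm.length_eq]; simp
      rcases List.pairwise_cons.mp hsort with ⟨hf, hsort1⟩
      rcases List.pairwise_cons.mp hsort1 with ⟨hs, hsort2⟩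
      -- first pop
      have hpop1 : pvHeapPop heap = some (f, heap.erase f) :=
        pvHeapPop_of_perm_sorted heap f (s :: rest) hperm
          (List.forall_mem_cons.mpr ⟨le_refl f, hf⟩)
      have hperm1 : (heap.erase f).Perm (s :: rest) := by
        have := hperm.erase f
        rwa [List.erase_cons_head] at this
      -- second pop
      have hpop2 : pvHeapPop (heap.erase f) = some (s, (heap.erase f).erase s) :=
        pvHeapPop_of_perm_sorted (heap.erase f) s rest hperm1
          (List.forall_mem_cons.mpr ⟨le_refl s, hs⟩)
      have hperm2 : ((heap.erase f).erase s).Perm rest := by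
        have := hperm1.erase s
        rwa [List.erase_cons_head] at this
      rw [pvLoopA, pvLoopB]
      rw [dif_pos hlen2]
      split
      next heq => rw [hpop1] at heq; cases heq
      next fv h1 heq =>
      rw [hpop1] at heq
      rw [Option.some.injEq, Prod.mk.injEq] at heq
      obtain ⟨rfl, rfl⟩ := heq
      by_cases hK : f ≥ K
      · simp [hK]
      rw [if_neg hK, if_neg hK]
      split
      next heq2 => rw [hpop2] at heq2; cases heq2
      next sv h2 heq2 =>
      rw [hpop2] at heq2
      rw [Option.some.injEq, Prod.mk.injEq] at heq2
      obtain ⟨rfl, rfl⟩ := heq2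
      -- recursive step
      have hnext_perm : ((heap.erase f).erase s ++ [f + s * 2]).Perm
          (pvInsertSorted (f + s * 2) rest) := by
        refine List.Perm.trans ?_ (pvInsertSorted_perm (f + s * 2) rest).symm
        exact (hperm2.append_right _).trans (List.perm_append_singleton _ _)
      have hnext_sorted : (pvInsertSorted (f + s * 2) rest).Pairwise (· ≤ ·) :=
        pvInsertSorted_pairwise _ _ hsort2
      have hnext_len : (pvInsertSorted (f + s * 2) rest).length < n := by
        rw [pvInsertSorted_length]
        simp at hlen
        omega
      exact ih _ hnext_len _ _ _ _ rfl hnext_perm hnext_sorted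

-- ===== VERDICT (by name: the statement is the Claim_ definition above) =====
theorem solution_spec : Claim_equal_solution := by
  intro scoville K _hDom _hPre
  unfold Spec_solution solution solution_alt
  exact pvLoop_eq (PySem.List.sorted scoville (fun x => x) false).length
    (PySem.List.sorted scoville (fun x => x) false) scoville K 0 rfl
    (PySem.List.sorted_perm ..).symm (PySem.List.sorted_pairwise ..)
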